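-- pv_equiv track=rewrite | github.com/ItsHimReally/USETECHhack | Services/fastapi/app/main.py | get_url_by_pattern
-- ===== SOURCE A (Python) =====
-- def get_url_by_pattern(urls, pattern):
--     ln = 0
--     res = ''
--     for url in urls:
--         if pattern.startswith(url) and len(url) > ln:
--             ln = len(url)
--             res = url
--
--     return res
-- ===== SOURCE B (Python) =====
-- def get_url_by_pattern(urls, pattern):
--     url_set = set(urls)
--     for length in sorted({len(url) for url in urls}, reverse=True):
--         if length <= len(pattern) and pattern[:length] in url_set:
--             return pattern[:length]
--     return ''
-- ===== Notes on version B (the rewrite author's own statement) =====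
-- stated objective: alternative
-- what changed: Instead of scanning the url list with a running maximum over pattern.startswith tests, B builds a set of the urls once, sorts the distinct url lengths descending, and returns the first pattern prefix of a candidate length found in the set; correct because any url of length L that prefixes pattern equals pattern[:L].
import Mathlib
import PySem

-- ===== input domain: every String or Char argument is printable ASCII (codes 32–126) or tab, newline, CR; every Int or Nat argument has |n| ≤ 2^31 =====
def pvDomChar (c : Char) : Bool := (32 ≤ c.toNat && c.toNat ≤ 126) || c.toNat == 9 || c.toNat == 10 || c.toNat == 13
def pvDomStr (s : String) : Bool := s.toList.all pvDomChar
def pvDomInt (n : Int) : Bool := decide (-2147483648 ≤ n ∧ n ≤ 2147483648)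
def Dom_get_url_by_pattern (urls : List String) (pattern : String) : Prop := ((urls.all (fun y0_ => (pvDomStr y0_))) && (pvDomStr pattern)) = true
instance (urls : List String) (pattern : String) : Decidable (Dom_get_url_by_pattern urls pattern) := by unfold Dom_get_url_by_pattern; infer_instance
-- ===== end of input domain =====

-- B replaces A's running-maximum scan over urls by a set of urls plus a longest-first walk over pattern's prefixes (a different algorithm of similar cost).


-- ===== PORT A =====
-- literal port of A: running maximum with state (ln, res), strict-greater update
def get_url_by_pattern (urls : List String) (pattern : String) : String :=
  (urls.foldl
    (fun (s : Int × String) url =>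
      if PySem.Str.startswith pattern url = true ∧ PySem.Str.len url > s.1 then
        (PySem.Str.len url, url)
      else s)
    ((0 : Int), "")).2

-- ===== PORT B =====
-- literal port of B: the 'for length in sorted({len(url) for url in urls}, reverse=True)' loop with early return
def pvAltLoop (url_set : PySem.Set String) (pattern : String) : List Int → String
  | [] => ""
  | length :: rest =>
      if length ≤ PySem.Str.len pattern ∧
          PySem.Set.contains url_set (PySem.Str.slice pattern none (some length)) = true then
        PySem.Str.slice pattern none (some length)
      else pvAltLoop url_set pattern rest

def get_url_by_pattern_alt (urls : List String) (pattern : String) : String :=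
  let url_set : PySem.Set String := PySem.Set.ofList urls
  pvAltLoop url_set pattern
    (PySem.List.sorted (PySem.Set.ofList (urls.map (fun url => PySem.Str.len url)))
      (fun x => x) true)

-- ===== PRECONDITION & SPEC =====
def Spec_get_url_by_pattern (urls : List String) (pattern : String) (out : String) : Prop := out = get_url_by_pattern_alt urls pattern
instance (urls : List String) (pattern : String) (out : String) : Decidable (Spec_get_url_by_pattern urls pattern out) := by unfold Spec_get_url_by_pattern; infer_instance

-- ===== CLAIM (what is proved, stated in full; the proofs are below) =====
def Claim_equal_get_url_by_pattern : Prop := ∀ (urls : List String) (pattern : String), Dom_get_url_by_pattern urls pattern → Spec_get_url_by_pattern urls pattern (get_url_by_pattern urls pattern)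

-- ===== LEMMAS AND PROOFS =====

/-- Length of the longest url that prefixes `p`, as a left fold (0 if none). -/
def pvBest (p : List Char) (urls : List String) (m : Nat) : Nat :=
  urls.foldl (fun m u => if u.toList <+: p then max m u.toList.length else m) m

lemma pvBest_mono (p : List Char) (urls : List String) (m : Nat) : m ≤ pvBest p urls m := by
  induction urls generalizing m with
  | nil => simp [pvBest]
  | cons u t ih =>
    simp only [pvBest, List.foldl_cons]
    split_ifs with h
    · exact le_trans (le_max_left _ _) (ih _)
    · exact ih m

lemma pvBest_ub (p : List Char) (urls : List String) (m : Nat) (u : String)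
    (hu : u ∈ urls) (hp : u.toList <+: p) : u.toList.length ≤ pvBest p urls m := by
  induction urls generalizing m with
  | nil => cases hu
  | cons v t ih =>
    simp only [pvBest, List.foldl_cons]
    rcases List.mem_cons.mp hu with rfl | hmem
    · rw [if_pos hp]
      exact le_trans (le_max_right _ _) (pvBest_mono p t _)
    · split_ifs with h
      · exact ih _ hmem
      · exact ih _ hmem

lemma pvBest_le (p : List Char) (urls : List String) (m : Nat) (hm : m ≤ p.length) :
    pvBest p urls m ≤ p.length := by
  induction urls generalizing m with
  | nil => simpa [pvBest] using hm
  | cons u t ih =>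
    simp only [pvBest, List.foldl_cons]
    split_ifs with h
    · exact ih _ (max_le hm h.length_le)
    · exact ih _ hm

lemma pvBest_mem (p : List Char) (urls : List String) (m : Nat) :
    pvBest p urls m = m ∨ ∃ u ∈ urls, u.toList <+: p ∧ u.toList.length = pvBest p urls m := by
  induction urls generalizing m with
  | nil => exact Or.inl rfl
  | cons u t ih =>
    simp only [pvBest, List.foldl_cons]
    split_ifs with h
    · rcases ih (max m u.toList.length) with he | ⟨v, hv, hvp, hvl⟩
      · rcases Nat.le_total u.toList.length m with hle | hle
        · left
          show pvBest p t (max m u.toList.length) = m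
          omega
        · right
          refine ⟨u, List.mem_cons_self, h, ?_⟩
          show u.toList.length = pvBest p t (max m u.toList.length)
          omega
      · exact Or.inr ⟨v, List.mem_cons_of_mem _ hv, hvp, hvl⟩
    · rcases ih m with he | ⟨v, hv, hvp, hvl⟩
      · exact Or.inl he
      · exact Or.inr ⟨v, List.mem_cons_of_mem _ hv, hvp, hvl⟩

/-- A's fold keeps the invariant: the stored string's characters are the first `m`
characters of the pattern, where `m` is the running best length. -/
lemma pvFoldA (p : List Char) (pattern : String) (hp : pattern.toList = p)
    (urls : List String) :
    ∀ (m : Nat) (res : String), res.toList = p.take m →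
      ((urls.foldl
        (fun (s : Int × String) url =>
          if PySem.Str.startswith pattern url = true ∧ PySem.Str.len url > s.1 then
            (PySem.Str.len url, url)
          else s)
        ((m : Int), res)).2).toList = p.take (pvBest p urls m) := by
  induction urls with
  | nil => intro m res hres; simpa [pvBest]
  | cons u t ih =>
    intro m res hres
    simp only [List.foldl_cons, pvBest, List.foldl_cons]
    by_cases hsw : u.toList <+: p
    · have hsw' : PySem.Str.startswith pattern u = true := by
        simp only [PySem.Str.startswith_eq]
        rw [hp]
        exact (PySem.Chars.startswith_iff _ _).mpr hsw
      by_cases hlen : u.toList.length > m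
      · have hcond : PySem.Str.startswith pattern u = true ∧ PySem.Str.len u > (m : Int) := by
          refine ⟨hsw', ?_⟩
          rw [PySem.Str.len_eq]
          exact_mod_cast hlen
        rw [if_pos hcond]
        have hmax : max m u.toList.length = u.toList.length := by omega
        have hres' : u.toList = p.take u.toList.length := List.prefix_iff_eq_take.mp hsw
        have : (PySem.Str.len u, u) = ((u.toList.length : Int), u) := by
          rw [PySem.Str.len_eq]
        rw [this, if_pos hsw, hmax]
        exact ih u.toList.length u hres'
      · have hcond : ¬ (PySem.Str.startswith pattern u = true ∧ PySem.Str.len u > (m : Int)) := by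
          rintro ⟨-, hgt⟩
          rw [PySem.Str.len_eq] at hgt
          exact hlen (by exact_mod_cast hgt)
        rw [if_neg hcond, if_pos hsw]
        have hmax : max m u.toList.length = m := by omega
        rw [hmax]
        exact ih m res hres
    · have hsw' : ¬ PySem.Str.startswith pattern u = true := by
        simp only [PySem.Str.startswith_eq]
        rw [hp]
        exact fun hc => hsw ((PySem.Chars.startswith_iff _ _).mp hc)
      rw [if_neg (by tauto), if_neg hsw]
      exact ih m res hres

/-- B's loop over a descending list of candidate lengths (all of them url lengths,
containing the best length when it is positive) returns the best prefix. -/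
lemma pvFoldB (p : List Char) (pattern : String) (hp : pattern.toList = p)
    (urls : List String) (b : Nat) (hb : b = pvBest p urls 0) :
    ∀ (ls : List Int),
      (∀ L ∈ ls, ∃ u ∈ urls, L = PySem.Str.len u) →
      ls.Pairwise (fun a c => c ≤ a) →
      (0 < b → (b : Int) ∈ ls) →
      (pvAltLoop (PySem.Set.ofList urls) pattern ls).toList = p.take b := by
  intro ls
  induction ls with
  | nil =>
    intro _ _ hbmem
    have hb0 : b = 0 := by
      by_contra h
      exact absurd (hbmem (Nat.pos_of_ne_zero h)) (List.not_mem_nil)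
    simp [pvAltLoop, hb0]
  | cons L rest ih =>
    intro hlens hpw hbmem
    obtain ⟨u, hu, hLu⟩ := hlens L List.mem_cons_self
    have hL0 : 0 ≤ L := by
      rw [hLu, PySem.Str.len_eq]; positivity
    have hpw' := List.pairwise_cons.mp hpw
    simp only [pvAltLoop]
    by_cases hcond : L ≤ PySem.Str.len pattern ∧
        PySem.Set.contains (PySem.Set.ofList urls)
          (PySem.Str.slice pattern none (some L)) = true
    · rw [if_pos hcond]
      obtain ⟨hLlen, hcont⟩ := hcond
      have hLp : L.toNat ≤ p.length := by
        rw [PySem.Str.len_eq, hp] at hLlen; omega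
      have hpfx : (PySem.Str.slice pattern none (some L)).toList = p.take L.toNat := by
        rw [PySem.Str.toList_slice, hp, PySem.Chars.slice_eq_listSlice,
          PySem.List.slice_to _ hL0]
      have hmem : PySem.Str.slice pattern none (some L) ∈ urls :=
        (PySem.Set.mem_ofList _ _).mp ((PySem.Set.contains_iff _ _).mp hcont)
      have hpre : (PySem.Str.slice pattern none (some L)).toList <+: p := by
        rw [hpfx]; exact List.take_prefix _ _
      have hlenpfx : (PySem.Str.slice pattern none (some L)).toList.length = L.toNat := by
        rw [hpfx, List.length_take]; omega
      have hub := pvBest_ub p urls 0 _ hmem hpre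
      rw [hlenpfx, ← hb] at hub
      -- b ≤ L.toNat: if b > 0 then (b : Int) is in the descending list headed by L
      have hble : b ≤ L.toNat := by
        rcases Nat.eq_zero_or_pos b with h0 | hpos
        · omega
        · rcases List.mem_cons.mp (hbmem hpos) with heq | hmem'
          · omega
          · have := hpw'.1 _ hmem'
            omega
      have hbeq : b = L.toNat := le_antisymm hble hub
      rw [hpfx, hbeq]
    · rw [if_neg hcond]
      refine ih (fun L' hL' => hlens L' (List.mem_cons_of_mem _ hL')) hpw'.2 ?_
      intro hpos
      rcases List.mem_cons.mp (hbmem hpos) with heq | hmem'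
      · -- L = b would make the skipped test true: contradiction
        exfalso
        apply hcond
        constructor
        · rw [← heq, PySem.Str.len_eq, hp]
          have := pvBest_le p urls 0 (Nat.zero_le _)
          rw [← hb] at this
          exact_mod_cast this
        · rcases pvBest_mem p urls 0 with he | ⟨v, hv, hvp, hvl⟩
          · rw [← hb] at he; omega
          · rw [← hb] at hvl
            have hv' : v.toList = p.take b := by
              have := List.prefix_iff_eq_take.mp hvp
              rw [hvl] at this; exact this
            have hveq : v = PySem.Str.slice pattern none (some L) := by
              apply String.toList_inj.mp
              rw [hv', PySem.Str.toList_slice, hp, PySem.Chars.slice_eq_listSlice,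
                PySem.List.slice_to _ hL0, ← heq]
              simp
            rw [hveq] at hv
            exact (PySem.Set.contains_iff _ _).mpr ((PySem.Set.mem_ofList _ _).mpr hv)
      · exact hmem'

-- ===== VERDICT (by name: the statement is the Claim_ definition above) =====
theorem get_url_by_pattern_spec : Claim_equal_get_url_by_pattern := by
  intro urls pattern _
  unfold Spec_get_url_by_pattern get_url_by_pattern get_url_by_pattern_alt
  set p := pattern.toList with hp
  apply String.toList_inj.mp
  have hA := pvFoldA p pattern hp.symm urls 0 "" (by simp)
  have hB := pvFoldB p pattern hp.symm urls (pvBest p urls 0) rfl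
    (PySem.List.sorted (PySem.Set.ofList (urls.map (fun url => PySem.Str.len url)))
      (fun x => x) true)
    (by
      intro L hL
      have hL' : L ∈ PySem.Set.ofList (urls.map (fun url => PySem.Str.len url)) :=
        (PySem.List.mem_sorted _ _ _ _).mp hL
      have := (PySem.Set.mem_ofList _ _).mp hL'
      obtain ⟨u, hu, hLu⟩ := List.mem_map.mp this
      exact ⟨u, hu, hLu.symm⟩)
    (PySem.List.sorted_pairwise_rev _ _)
    (by
      intro hpos
      rcases pvBest_mem p urls 0 with he | ⟨v, hv, hvp, hvl⟩
      · omega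
      · have hv' : ((pvBest p urls 0 : Nat) : Int) = PySem.Str.len v := by
          rw [PySem.Str.len_eq, ← hvl]
        apply (PySem.List.mem_sorted _ _ _ _).mpr
        apply (PySem.Set.mem_ofList _ _).mpr
        exact List.mem_map.mpr ⟨v, hv, hv'.symm⟩)
  rw [show ((0 : Nat) : Int) = (0 : Int) from rfl] at hA
  rw [hA]
  exact hB.symm ▸ rfl
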